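-- pv_equiv track=rewrite | github.com/zjia0259/CS30-1 | Sen Han/app.py | _update_vehicle_index
-- ===== SOURCE A (Python) =====
-- from typing import Any
--
-- def _update_vehicle_index(record_map: dict[str, dict[str, Any]]) -> dict[str, list[dict[str, Any]]]:
--     index: dict[str, list[dict[str, Any]]] = {}
--     for record in record_map.values():
--         vehicle_id = record["vehicle_id"]
--         index.setdefault(vehicle_id, []).append(record)
--     for vehicle_id in index:
--         index[vehicle_id].sort(key=lambda item: item["frame_id"])
--     return index
-- ===== SOURCE B (Python) =====
-- from typing import Any
--
--
-- def _update_vehicle_index(record_map: dict[str, dict[str, Any]]) -> dict[str, list[dict[str, Any]]]: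
--     # No intermediate dict of buckets: ONE stable global sort by frame_id, then a
--     # comprehension filtering the sorted stream per vehicle_id (ids deduplicated in
--     # first-appearance order).  Stability of sorted() keeps each bucket's tie order.
--     records = list(record_map.values())
--     ordered = sorted(records, key=lambda item: item["frame_id"])
--     vehicle_ids = list(dict.fromkeys(record["vehicle_id"] for record in records))
--     return {
--         vid: [record for record in ordered if record["vehicle_id"] == vid]
--         for vid in vehicle_ids
--     }
-- ===== Notes on version B (the rewrite author's own statement) =====
-- stated objective: alternative
-- what changed: A folds records into a dict of buckets keyed by vehicle_id and then sorts each bucket separately; B keeps no bucket dict at all: it does ONE stable global sort of all records by frame_id, deduplicates the vehicle ids in first-appearance order, and builds each group by filtering the sorted stream per id in a comprehension.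
import Mathlib
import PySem

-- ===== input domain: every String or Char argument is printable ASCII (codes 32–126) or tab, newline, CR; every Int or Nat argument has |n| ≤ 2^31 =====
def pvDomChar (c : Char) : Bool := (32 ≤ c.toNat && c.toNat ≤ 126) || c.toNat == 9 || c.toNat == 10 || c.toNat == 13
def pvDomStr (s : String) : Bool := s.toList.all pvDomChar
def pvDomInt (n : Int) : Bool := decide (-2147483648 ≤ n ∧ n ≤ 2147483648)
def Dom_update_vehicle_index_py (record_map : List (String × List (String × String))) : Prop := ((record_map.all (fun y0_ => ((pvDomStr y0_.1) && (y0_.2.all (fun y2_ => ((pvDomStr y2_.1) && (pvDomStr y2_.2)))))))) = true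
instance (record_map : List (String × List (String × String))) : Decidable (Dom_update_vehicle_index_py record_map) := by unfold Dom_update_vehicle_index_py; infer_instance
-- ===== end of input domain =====

-- B removes A's dict of buckets entirely: ONE stable global sort by frame_id, dedup of the vehicle
-- ids in first-appearance order, and each group built by filtering the sorted stream per id
-- (objective: alternative decomposition, same cost class).

-- ===== PORT A =====
-- record["vehicle_id"] / record["frame_id"]: dict lookup; total via getD "" — Pre_ guarantees the key is present.
def pvVid (r : List (String × String)) : String := (PySem.Dict.mk r).getD "vehicle_id" ""
def pvFid (r : List (String × String)) : String := (PySem.Dict.mk r).getD "frame_id" ""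

def update_vehicle_index_py (record_map : List (String × List (String × String))) : List (String × List (List (String × String))) :=
  -- index.setdefault(vehicle_id, []).append(record)  ==  index[vid] = index.get(vid, []) + [record]
  let index : PySem.Dict String (List (List (String × String))) :=
    record_map.foldl (fun d p => d.modify (pvVid p.2) [] (· ++ [p.2])) PySem.Dict.empty
  -- for vehicle_id in index: index[vehicle_id].sort(key=lambda item: item["frame_id"])
  index.items.map (fun kv => (kv.1, PySem.List.sorted kv.2 pvFid))

-- ===== PORT B =====
def update_vehicle_index_py_alt (record_map : List (String × List (String × String))) : List (String × List (List (String × String))) :=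
  -- records = list(record_map.values())
  let records := record_map.map (·.2)
  -- ordered = sorted(records, key=lambda item: item["frame_id"])  (stable)
  let ordered := PySem.List.sorted records pvFid
  -- vehicle_ids = list(dict.fromkeys(record["vehicle_id"] for record in records))
  let vehicle_ids := PySem.List.dedup (records.map pvVid)
  -- {vid: [record for record in ordered if record["vehicle_id"] == vid] for vid in vehicle_ids}
  vehicle_ids.map (fun vid => (vid, ordered.filter (fun r => pvVid r == vid)))

-- ===== PRECONDITION & SPEC =====
-- Pre_: every record carries the keys "vehicle_id" and "frame_id" — exactly where Python A returns (else KeyError).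
def Pre_update_vehicle_index_py (record_map : List (String × List (String × String))) : Prop :=
  ∀ p ∈ record_map, "vehicle_id" ∈ p.2.map (·.1) ∧ "frame_id" ∈ p.2.map (·.1)
instance (record_map : List (String × List (String × String))) : Decidable (Pre_update_vehicle_index_py record_map) := by unfold Pre_update_vehicle_index_py; infer_instance

def pvWitness_update_vehicle_index_py : (List (String × List (String × String))) :=
  [("r1", [("vehicle_id", "v1"), ("frame_id", "3")]), ("r2", [("vehicle_id", "v1"), ("frame_id", "1")])]

def Spec_update_vehicle_index_py (record_map : List (String × List (String × String))) (out : List (String × List (List (String × String)))) : Prop := out = update_vehicle_index_py_alt record_map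
instance (record_map : List (String × List (String × String))) (out : List (String × List (List (String × String)))) : Decidable (Spec_update_vehicle_index_py record_map out) := by unfold Spec_update_vehicle_index_py; infer_instance

-- ===== CLAIM (what is proved, stated in full; the proofs are below) =====
def Claim_equal_update_vehicle_index_py : Prop := ∀ (record_map : List (String × List (String × String))), Dom_update_vehicle_index_py record_map → Pre_update_vehicle_index_py record_map → Spec_update_vehicle_index_py record_map (update_vehicle_index_py record_map)

-- ===== LEMMAS AND PROOFS =====

theorem pv_insertBy_front {α : Type} (before : α → α → Bool) (x : α) (l : List α)
    (h : ∀ z ∈ l, before x z = true) :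
    PySem.List.insertBy before x l = x :: l := by
  cases l with
  | nil => rfl
  | cons z zs => simp [PySem.List.insertBy, h z (by simp)]

theorem pv_filter_insertBy {α κ : Type} [LinearOrder κ] (key : α → κ) (p : α → Bool) (x : α)
    (acc : List α) (hs : acc.Pairwise (fun a b => key a ≤ key b)) :
    (PySem.List.insertBy (fun a b => decide (key a < key b)) x acc).filter p =
      if p x then PySem.List.insertBy (fun a b => decide (key a < key b)) x (acc.filter p)
      else acc.filter p := by
  induction acc with
  | nil => simp [PySem.List.insertBy]; split <;> simp_all
  | cons y ys ih =>
    rw [List.pairwise_cons] at hs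
    by_cases hxy : key x < key y
    · -- x goes in front
      have hfront : PySem.List.insertBy (fun a b => decide (key a < key b)) x (y :: ys) = x :: y :: ys := by
        simp [PySem.List.insertBy, hxy]
      rw [hfront]
      by_cases hpx : p x
      · by_cases hpy : p y
        · have : (y :: ys).filter p = y :: ys.filter p := by simp [hpy]
          rw [this]
          have : PySem.List.insertBy (fun a b => decide (key a < key b)) x (y :: ys.filter p) = x :: y :: ys.filter p := by
            simp [PySem.List.insertBy, hxy]
          simp [hpx, hpy, this]
        · have hfy : (y :: ys).filter p = ys.filter p := by simp [hpy]
          rw [hfy]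
          have hall : ∀ z ∈ ys.filter p, decide (key x < key z) = true := by
            intro z hz
            have hz' := List.mem_of_mem_filter hz
            have := hs.1 z hz'
            simp; exact lt_of_lt_of_le hxy this
          rw [pv_insertBy_front _ _ _ hall]
          simp [hpx, hpy]
      · simp [hpx]
    · -- y stays in front
      have hstep : PySem.List.insertBy (fun a b => decide (key a < key b)) x (y :: ys) =
          y :: PySem.List.insertBy (fun a b => decide (key a < key b)) x ys := by
        simp [PySem.List.insertBy, hxy]
      rw [hstep]
      have ihy := ih hs.2
      by_cases hpx : p x
      · by_cases hpy : p y
        · have : (y :: ys).filter p = y :: ys.filter p := by simp [hpy]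
          rw [this]
          have : PySem.List.insertBy (fun a b => decide (key a < key b)) x (y :: ys.filter p) =
              y :: PySem.List.insertBy (fun a b => decide (key a < key b)) x (ys.filter p) := by
            simp [PySem.List.insertBy, hxy]
          simp [hpx, hpy, this, ihy]
        · simp [hpx, hpy, ihy]
      · simp only [List.filter_cons]
        rw [ihy]
        simp [hpx]

theorem pv_sorted_append_singleton {α κ : Type} [LinearOrder κ] (key : α → κ) (xs : List α) (x : α) :
    PySem.List.sorted (xs ++ [x]) key =
      PySem.List.insertBy (fun a b => decide (key a < key b)) x (PySem.List.sorted xs key) := by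
  rw [PySem.List.sorted_eq_foldl_insertBy, PySem.List.sorted_eq_foldl_insertBy, List.foldl_append]
  rfl

theorem pv_filter_sorted {α κ : Type} [LinearOrder κ] (key : α → κ) (p : α → Bool) (xs : List α) :
    (PySem.List.sorted xs key).filter p = PySem.List.sorted (xs.filter p) key := by
  induction xs using List.reverseRecOn with
  | nil => rfl
  | append_singleton xs x ih =>
    rw [pv_sorted_append_singleton, pv_filter_insertBy key p x _ (PySem.List.sorted_pairwise xs key),
        List.filter_append, ih]
    by_cases hpx : p x
    · simp only [hpx, if_pos, List.filter_cons, List.filter_nil]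
      simp [pv_sorted_append_singleton]
    · simp [hpx]

theorem pv_keys_pairfold {κ β : Type} [BEq κ] [LawfulBEq κ] (l : List (κ × β))
    (d : PySem.Dict κ (List β)) :
    (l.foldl (fun d p => d.modify p.1 [] (· ++ [p.2])) d).keys =
      PySem.Set.update d.keys (l.map (·.1)) := by
  induction l generalizing d with
  | nil => rfl
  | cons q qs ih =>
    simp only [List.foldl_cons, List.map_cons, ih, PySem.Dict.keys_modify]
    have : (d.insert q.1 ((· ++ [q.2]) (d.getD q.1 []))).keys = PySem.Set.add d.keys q.1 := by
      have := PySem.Dict.keys_foldl_insert [q.1] (fun d _ => (· ++ [q.2]) (d.getD q.1 [])) d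
      simpa [PySem.Set.update] using this
    rw [this]
    rfl

theorem pv_core {σ α κ κ' : Type} [BEq κ] [LawfulBEq κ] [LinearOrder κ']
    (vid : α → κ) (fid : α → κ') (rm : List (σ × α)) :
    ((rm.foldl (fun d p => d.modify (vid p.2) [] (· ++ [p.2])) PySem.Dict.empty).items.map
        (fun kv => (kv.1, PySem.List.sorted kv.2 fid)))
      = (PySem.List.dedup ((rm.map (·.2)).map vid)).map
          (fun k => (k, (PySem.List.sorted (rm.map (·.2)) fid).filter (fun r => vid r == k))) := by
  have hfoldA : rm.foldl (fun d p => d.modify (vid p.2) [] (· ++ [p.2])) PySem.Dict.empty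
      = (rm.map (fun p => (vid p.2, p.2))).foldl
          (fun d q => d.modify q.1 [] (· ++ [q.2])) PySem.Dict.empty := by
    rw [List.foldl_map]
  -- keys of A's dict = the deduped vehicle ids, in first-appearance order
  have hKA : (rm.foldl (fun d p => d.modify (vid p.2) [] (· ++ [p.2])) PySem.Dict.empty).keys
      = PySem.List.dedup ((rm.map (·.2)).map vid) := by
    rw [hfoldA, pv_keys_pairfold]
    simp only [List.map_map, Function.comp_def, PySem.List.dedup_eq_ofList,
      PySem.Set.ofList_eq_foldl]
    simp [PySem.Dict.empty, PySem.Dict.keys, PySem.Set.update]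
  have hnodup : (rm.foldl (fun d p => d.modify (vid p.2) [] (· ++ [p.2])) PySem.Dict.empty).keys.Nodup := by
    rw [hKA]; exact PySem.List.nodup_dedup _
  -- getD of A's dict: the records with that vehicle id, in record_map order
  have hgA : ∀ k, (rm.foldl (fun d p => d.modify (vid p.2) [] (· ++ [p.2])) PySem.Dict.empty).getD k []
      = (rm.map (·.2)).filter (fun r => vid r == k) := by
    intro k
    rw [hfoldA, PySem.Dict.getD_foldl_modify_append]
    simp [List.filter_map, List.map_map, Function.comp_def, PySem.Dict.empty, PySem.Dict.getD,
      PySem.Dict.get?]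
  rw [PySem.Dict.items_eq_map_keys _ hnodup [], List.map_map, hKA]
  apply List.map_congr_left
  intro k hk
  simp only [Function.comp]
  rw [hgA, pv_filter_sorted]

-- ===== VERDICT (by name: the statement is the Claim_ definition above) =====
theorem update_vehicle_index_py_spec : Claim_equal_update_vehicle_index_py := by
  intro record_map _hdom _hpre
  show update_vehicle_index_py record_map = update_vehicle_index_py_alt record_map
  unfold update_vehicle_index_py update_vehicle_index_py_alt
  exact pv_core pvVid pvFid record_map
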